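-- pv_equiv track=rewrite | github.com/taispin/MAC0465 | ep3/ep3.py | encontra_territorio
-- ===== SOURCE A (Python) =====
-- def encontra_territorio(adj, n, r):
--     #branco = -1
--     #cinza = 0
--     #preto = 1
--     cor = []
--     lista = []
--
--     #todos os vertices soa brancos
--     for i in range(n):
--         cor.append(-1)
--
--     #o vertice r é cinza
--     cor[r] = 0
--
--     #insere r na lista
--     lista.append(r)
--
--     #enquanto a lista não estiver vazia
--     while len(lista) > 0:
--         #tiro o primeiro elemento da lista e verifico a quem ele se liga
--         u = lista.pop(0)
--         for i in range(n):
--             if adj[u][i] > 0: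
--                 #se elemento ainda não foi inserido na lista
--                 if cor[i] == -1:
--                     #elemento fica cinza e inserido na lista
--                     cor[i] = 0
--                     lista.append(i)
--         #u fica preto
--         cor[u] = 1
--
--     return cor
-- ===== SOURCE B (Python) =====
-- def encontra_territorio(adj, n, r):
--     # Depth-first search with an explicit LIFO stack, two colors only
--     # (reachable=1 marked on push), fetching each row once and scanning it
--     # with a manual index loop, instead of A's three-color FIFO queue.
--     cor = [-1] * n
--     cor[r] = 1
--     pilha = [r]
--     while pilha:
--         u = pilha.pop()
--         row = adj[u]
--         i = 0
--         while i < n: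
--             if row[i] > 0 and cor[i] == -1:
--                 cor[i] = 1
--                 pilha.append(i)
--             i += 1
--     return cor
-- ===== Notes on version B (the rewrite author's own statement) =====
-- stated objective: alternative
-- what changed: Replaces A's three-color BFS (FIFO queue via lista.pop(0), mark gray then black after a per-vertex range scan) with a two-color depth-first search over an explicit LIFO stack that marks vertices reachable when pushed and scans each row, fetched once, by a manual index while-loop; the reachable set, hence the returned coloring, is independent of traversal order.
-- outside the precondition, e.g. on encontra_territorio([[0, 0], [5]], 2, 0): A returns [1, -1], B returns [1, -1]; on encontra_territorio([[-1, -2]], 2, 0): A returns [1, -1], B returns [1, -1]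
import Mathlib
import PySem

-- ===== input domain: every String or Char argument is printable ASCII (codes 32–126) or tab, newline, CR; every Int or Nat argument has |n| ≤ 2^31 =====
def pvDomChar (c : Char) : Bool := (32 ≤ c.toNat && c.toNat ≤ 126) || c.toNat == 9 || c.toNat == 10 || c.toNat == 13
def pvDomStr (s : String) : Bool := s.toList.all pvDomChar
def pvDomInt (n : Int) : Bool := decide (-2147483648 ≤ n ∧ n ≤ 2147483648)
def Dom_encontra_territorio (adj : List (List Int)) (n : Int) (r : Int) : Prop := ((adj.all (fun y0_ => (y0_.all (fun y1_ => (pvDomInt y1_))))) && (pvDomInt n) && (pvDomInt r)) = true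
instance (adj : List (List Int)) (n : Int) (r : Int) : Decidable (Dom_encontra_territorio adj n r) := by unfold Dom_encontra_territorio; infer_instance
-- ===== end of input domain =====

-- B replaces A's three-color FIFO BFS by a two-color explicit-stack DFS that marks on push and scans
-- each row, fetched once, by a manual index loop (alternative traversal, same reachability coloring);
-- equivalence is about the return value only.

-- ===== PORT A =====
def pvBodyA (adj : List (List Int)) (u : Int) (s : List Int × List Int) (i : Int) : List Int × List Int :=
  if PySem.List.pyGetD (PySem.List.pyGetD adj u []) i 0 > 0 then
    if PySem.List.pyGetD s.1 i 0 = -1 then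
      (PySem.List.pySetD s.1 i 0, s.2 ++ [i])
    else s
  else s

def pvLoopA (adj : List (List Int)) (n : Int) : Nat → List Int → List Int → List Int
  | 0, cor, _ => cor
  | fuel+1, cor, lista =>
    match lista with
    | [] => cor
    | u :: rest =>
      let s := (PySem.List.pyRange 0 n 1).foldl (pvBodyA adj u) (cor, rest)
      pvLoopA adj n fuel (PySem.List.pySetD s.1 u 1) s.2

def encontra_territorio (adj : List (List Int)) (n : Int) (r : Int) : List Int :=
  let cor := (PySem.List.pyRange 0 n 1).foldl (fun c (_ : Int) => c ++ [(-1 : Int)]) []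
  let cor := PySem.List.pySetD cor r 0
  pvLoopA adj n (n.toNat + 2) cor [r]

-- ===== PORT B =====
-- inner 'while i < n' of Source B: scan one fetched row, mark and push on the spot (fuel only makes it total)
def pvScanRow (row : List Int) (n : Int) : Nat → Int → List Int → List Int → List Int × List Int
  | 0, _, cor, pilha => (cor, pilha)
  | k+1, i, cor, pilha =>
    if i < n then
      if PySem.List.pyGetD row i 0 > 0 ∧ PySem.List.pyGetD cor i 0 = -1 then
        pvScanRow row n k (i+1) (PySem.List.pySetD cor i 1) (pilha ++ [i])
      else
        pvScanRow row n k (i+1) cor pilha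
    else (cor, pilha)

def pvDfsLoop (adj : List (List Int)) (n : Int) : Nat → List Int → List Int → List Int
  | 0, cor, _ => cor
  | fuel+1, cor, pilha =>
    match PySem.List.pop? pilha (-1) with
    | none => cor
    | some (u, rest) =>
      let row := PySem.List.pyGetD adj u []
      let s := pvScanRow row n (n.toNat + 1) 0 cor rest
      pvDfsLoop adj n fuel s.1 s.2

def encontra_territorio_alt (adj : List (List Int)) (n : Int) (r : Int) : List Int :=
  pvDfsLoop adj n (n.toNat + 2)
    (PySem.List.pySetD (PySem.List.pyRepeat [(-1 : Int)] n) r 1) [r]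

-- ===== PRECONDITION & SPEC =====
-- Pre_ excludes the inputs where A raises (n ≤ 0, r outside [-n, n), a visited row missing or shorter
-- than n) together with the ragged matrices on which whether A returns at all depends on which short or
-- missing rows the traversal happens to reach — no uniform shape condition separates those, and A's
-- completing there is an accident of the traversal; Pre_ keeps the root row (with Python's negative-index
-- wraparound for r < 0) and the first n rows at least n wide.
def Pre_encontra_territorio (adj : List (List Int)) (n : Int) (r : Int) : Prop :=
  -n ≤ r ∧ r < n ∧ n ≤ (adj.length : Int) ∧
  (∀ row ∈ adj.take n.toNat, n ≤ ((row.length : Nat) : Int)) ∧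
  n ≤ ((adj.getD ((if r < 0 then (adj.length : Int) + r else r).toNat) []).length : Int)
instance (adj : List (List Int)) (n : Int) (r : Int) : Decidable (Pre_encontra_territorio adj n r) := by
  unfold Pre_encontra_territorio; infer_instance

def pvWitness_encontra_territorio : List (List Int) × Int × Int := ([[0, 1], [0, 0]], 2, 0)

def Spec_encontra_territorio (adj : List (List Int)) (n : Int) (r : Int) (out : List Int) : Prop := out = encontra_territorio_alt adj n r
instance (adj : List (List Int)) (n : Int) (r : Int) (out : List Int) : Decidable (Spec_encontra_territorio adj n r out) := by unfold Spec_encontra_territorio; infer_instance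

-- ===== CLAIM (what is proved, stated in full; the proofs are below) =====
def Claim_equal_encontra_territorio : Prop := ∀ (adj : List (List Int)) (n : Int) (r : Int), Dom_encontra_territorio adj n r → Pre_encontra_territorio adj n r → Spec_encontra_territorio adj n r (encontra_territorio adj n r)

-- ===== LEMMAS AND PROOFS =====

-- Color-cell and row indices of a worklist token (Python's negative indices wrap).
def pvCellI (n x : Int) : Nat := (if x < 0 then n + x else x).toNat
def pvRowI (adj : List (List Int)) (x : Int) : Nat :=
  (if x < 0 then (adj.length : Int) + x else x).toNat
def pvE (adj : List (List Int)) (u v : Nat) : Prop := 0 < (adj.getD u []).getD v 0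
def pvRowT (adj : List (List Int)) (r : Int) : List Int := adj.getD (pvRowI adj r) []

-- Reachability: the root cell itself, plus everything reachable from a target of the root's
-- row through ordinary vertices (the root cell's own row is never scanned by either program).
def pvReach (adj : List (List Int)) (n r : Int) (j : Nat) : Prop :=
  j = pvCellI n r ∨ ∃ k : Nat, k < n.toNat ∧ 0 < (pvRowT adj r).getD k 0 ∧
    Relation.ReflTransGen (fun a b => b < n.toNat ∧ a ≠ pvCellI n r ∧ pvE adj a b) k j

-- Python indexing of tokens, as getD/set on the wrapped index
theorem pvCellI_natCast (n : Int) (j : Nat) : pvCellI n (j : Int) = j := by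
  simp only [pvCellI, if_neg (by omega : ¬ ((j : Int) < 0))]
  exact Int.toNat_natCast j

theorem pvCellI_lt (n x : Int) (h1 : -n ≤ x) (h2 : x < n) : pvCellI n x < n.toNat := by
  unfold pvCellI
  split_ifs <;> omega

theorem pvGetD_token (adj : List (List Int)) (x : Int) (h1 : -(adj.length : Int) ≤ x) :
    PySem.List.pyGetD adj x [] = adj.getD (pvRowI adj x) [] := by
  by_cases hx : x < 0
  · obtain ⟨k, hk1, hk2, rfl⟩ : ∃ k : Nat, 0 < k ∧ k ≤ adj.length ∧ x = -(k : Int) :=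
      ⟨(-x).toNat, by omega, by omega, by omega⟩
    rw [PySem.List.pyGetD_neg_natCast _ _ _ hk1 hk2]
    have hidx : pvRowI adj (-(k : Int)) = adj.length - k := by
      simp only [pvRowI, if_pos (by omega : -(k : Int) < 0)]
      omega
    rw [hidx, List.getD_eq_getElem _ _ (by omega)]
  · rw [PySem.List.pyGetD_of_nonneg _ _ (by omega), pvRowI, if_neg hx]

theorem pvSetD_cell (c : List Int) (n x v : Int) (hlen : (c.length : Int) = n)
    (h1 : -n ≤ x) (h2 : x < n) : PySem.List.pySetD c x v = c.set (pvCellI n x) v := by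
  by_cases hx : x < 0
  · obtain ⟨k, hk1, hk2, rfl⟩ : ∃ k : Nat, 0 < k ∧ k ≤ c.length ∧ x = -(k : Int) :=
      ⟨(-x).toNat, by omega, by omega, by omega⟩
    have hidx : pvCellI n (-(k : Int)) = c.length - k := by
      simp only [pvCellI, if_pos (by omega : -(k : Int) < 0)]
      omega
    rw [hidx]
    simp only [PySem.List.pySetD, PySem.List.pySet?, PySem.List.pyIdx?]
    split_ifs <;> simp_all
  · rw [PySem.List.pySetD_of_nonneg _ _ (by omega), pvCellI, if_neg hx]

-- small getD/set/count helpers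
theorem pvGetD_set_self (l : List Int) (k : Nat) (v : Int) (h : k < l.length) :
    (l.set k v).getD k 0 = v := by
  simp [List.getD_eq_getElem?_getD, h]

theorem pvGetD_set_ne (l : List Int) (k j : Nat) (v : Int) (h : k ≠ j) :
    (l.set k v).getD j 0 = l.getD j 0 := by
  simp [List.getD_eq_getElem?_getD, List.getElem?_set_ne h]

theorem pvCount_set_eq (l : List Int) (k : Nat) (v : Int) (h : k < l.length)
    (h1 : l.getD k 0 ≠ -1) (hv : v ≠ -1) : (l.set k v).count (-1) = l.count (-1) := by
  induction l generalizing k with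
  | nil => simp at h
  | cons a t ih =>
    cases k with
    | zero =>
      simp [List.getD_eq_getElem?_getD] at h1
      simp [hv, h1]
    | succ k =>
      simp at h
      have := ih k h (by simpa [List.getD_eq_getElem?_getD] using h1)
      simp [List.count_cons, List.set, this]

theorem pvCount_set_dec (l : List Int) (k : Nat) (v : Int) (h : k < l.length)
    (h1 : l.getD k 0 = -1) (hv : v ≠ -1) : (l.set k v).count (-1) + 1 = l.count (-1) := by
  induction l generalizing k with
  | nil => simp at h
  | cons a t ih =>
    cases k with
    | zero =>
      simp [List.getD_eq_getElem?_getD] at h1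
      subst h1
      simp [hv]
    | succ k =>
      simp at h
      have := ih k h (by simpa [List.getD_eq_getElem?_getD] using h1)
      simp [List.count_cons, List.set]
      omega

-- generic inner-scan body: mark value m (A uses 0, B uses 1)
def pvScanBody (adj : List (List Int)) (m u : Int) (s : List Int × List Int) (i : Int) : List Int × List Int :=
  if 0 < PySem.List.pyGetD (PySem.List.pyGetD adj u []) i 0 ∧ PySem.List.pyGetD s.1 i 0 = -1 then
    (PySem.List.pySetD s.1 i m, s.2 ++ [i])
  else s

-- B's manual index scan is the fold of the generic body over range(i, n)
theorem pvScanRow_eq_foldl (adj : List (List Int)) (u : Int) :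
    ∀ (k : Nat) (i : Int) (cor pilha : List Int), n ≤ i + k →
      pvScanRow (PySem.List.pyGetD adj u []) n k i cor pilha =
        (PySem.List.pyRange i n 1).foldl (pvScanBody adj 1 u) (cor, pilha) := by
  intro k
  induction k with
  | zero =>
    intro i cor pilha hk
    rw [PySem.List.pyRange_one_eq_nil (by omega)]
    rfl
  | succ k ih =>
    intro i cor pilha hk
    by_cases hi : i < n
    · rw [PySem.List.pyRange_one_cons hi, List.foldl_cons]
      simp only [pvScanRow, if_pos hi, pvScanBody]
      by_cases hc : PySem.List.pyGetD (PySem.List.pyGetD adj u []) i 0 > 0 ∧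
          PySem.List.pyGetD cor i 0 = -1
      · rw [if_pos hc, if_pos hc, ih (i+1) _ _ (by omega)]
      · rw [if_neg hc, if_neg hc, ih (i+1) _ _ (by omega)]
    · rw [PySem.List.pyRange_one_eq_nil (by omega)]
      simp only [pvScanRow, if_neg hi]
      rfl

structure pvInvA (adj : List (List Int)) (n r : Int) (c q : List Int) : Prop where
  len : c.length = n.toNat
  qmem : ∀ x ∈ q, -n ≤ x ∧ x < n ∧ c.getD (pvCellI n x) 0 = 0 ∧
           (x = r ∨ (0 ≤ x ∧ x.toNat ≠ pvCellI n r))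
  cells : (q.map (pvCellI n)).Nodup
  vals : ∀ j < n.toNat, c.getD j 0 = -1 ∨ c.getD j 0 = 0 ∨ c.getD j 0 = 1
  gray : ∀ j < n.toNat, c.getD j 0 = 0 → ∃ x ∈ q, pvCellI n x = j
  sound : ∀ j < n.toNat, c.getD j 0 ≠ -1 → pvReach adj n r j
  black : ∀ u < n.toNat, u ≠ pvCellI n r → c.getD u 0 = 1 →
            ∀ v < n.toNat, pvE adj u v → c.getD v 0 ≠ -1
  rootb : c.getD (pvCellI n r) 0 = 1 →
            ∀ v < n.toNat, 0 < (pvRowT adj r).getD v 0 → c.getD v 0 ≠ -1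
  root : c.getD (pvCellI n r) 0 ≠ -1

structure pvInvB (adj : List (List Int)) (n r : Int) (c st : List Int) : Prop where
  len : c.length = n.toNat
  stmem : ∀ x ∈ st, -n ≤ x ∧ x < n ∧ c.getD (pvCellI n x) 0 = 1 ∧
            (x = r ∨ (0 ≤ x ∧ x.toNat ≠ pvCellI n r))
  vals : ∀ j < n.toNat, c.getD j 0 = -1 ∨ c.getD j 0 = 1
  closed : ∀ u < n.toNat, u ≠ pvCellI n r → c.getD u 0 = 1 →
             (∃ x ∈ st, pvCellI n x = u) ∨ ∀ v < n.toNat, pvE adj u v → c.getD v 0 = 1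
  rootc : (∃ x ∈ st, pvCellI n x = pvCellI n r) ∨
            ∀ v < n.toNat, 0 < (pvRowT adj r).getD v 0 → c.getD v 0 = 1
  sound : ∀ j < n.toNat, c.getD j 0 = 1 → pvReach adj n r j
  root : c.getD (pvCellI n r) 0 = 1

def pvPost (adj : List (List Int)) (n r : Int) (c : List Int) : Prop :=
  c.length = n.toNat ∧ ∀ j < n.toNat,
    (pvReach adj n r j → c.getD j 0 = 1) ∧ (¬ pvReach adj n r j → c.getD j 0 = -1)

-- ===== the generic inner scan (A instantiates mark m = 0, B mark m = 1) =====
theorem pvScan_spec (adj : List (List Int)) (m u : Int) (rowu : List Int) (hm : m ≠ -1)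
    (hrowu : PySem.List.pyGetD adj u [] = rowu) :
    ∀ (il : List Int) (c q : List Int),
      (∀ i ∈ il, 0 ≤ i ∧ i < (c.length : Int)) →
      ((il.foldl (pvScanBody adj m u) (c, q)).1.length = c.length ∧
       (∀ j : Nat, (il.foldl (pvScanBody adj m u) (c, q)).1.getD j 0 = c.getD j 0 ∨
          (c.getD j 0 = -1 ∧ (il.foldl (pvScanBody adj m u) (c, q)).1.getD j 0 = m ∧
           (j : Int) ∈ (il.foldl (pvScanBody adj m u) (c, q)).2 ∧ j < c.length ∧ 0 < rowu.getD j 0)) ∧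
       (∃ new, (il.foldl (pvScanBody adj m u) (c, q)).2 = q ++ new ∧ new.Nodup ∧
          ∀ x ∈ new, ∃ j : Nat, x = (j : Int) ∧ j < c.length ∧ c.getD j 0 = -1 ∧
            (il.foldl (pvScanBody adj m u) (c, q)).1.getD j 0 = m ∧ 0 < rowu.getD j 0) ∧
       (∀ i ∈ il, 0 < rowu.getD i.toNat 0 →
          (il.foldl (pvScanBody adj m u) (c, q)).1.getD i.toNat 0 ≠ -1) ∧
       (il.foldl (pvScanBody adj m u) (c, q)).1.count (-1) +
          ((il.foldl (pvScanBody adj m u) (c, q)).2.length : Int) = c.count (-1) + q.length) := by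
  intro il
  induction il with
  | nil =>
    intro c q _
    exact ⟨rfl, fun j => Or.inl rfl, ⟨[], by simp⟩, by simp, by simp⟩
  | cons i it ih =>
    intro c q his
    obtain ⟨hi0, hilt⟩ := his i (List.mem_cons_self ..)
    have histl : ∀ i' ∈ it, 0 ≤ i' ∧ i' < (c.length : Int) :=
      fun i' hi' => his i' (List.mem_cons_of_mem _ hi')
    by_cases hT : 0 < PySem.List.pyGetD (PySem.List.pyGetD adj u []) i 0 ∧ PySem.List.pyGetD c i 0 = -1
    · -- the test fires: c[i] := m, q := q ++ [i]
      obtain ⟨j, rfl⟩ : ∃ j : Nat, i = (j : Int) := ⟨i.toNat, (Int.toNat_of_nonneg hi0).symm⟩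
      have hjlt : j < c.length := by omega
      have hcw : c.getD j 0 = -1 := by
        have := hT.2
        rwa [PySem.List.pyGetD_of_nonneg c 0 hi0, Int.toNat_natCast] at this
      have hedge : 0 < rowu.getD j 0 := by
        have := hT.1
        rwa [hrowu, PySem.List.pyGetD_of_nonneg _ 0 hi0, Int.toNat_natCast] at this
      have hstep : pvScanBody adj m u (c, q) (j : Int) = (c.set j m, q ++ [(j : Int)]) := by
        simp only [pvScanBody, if_pos hT, PySem.List.pySetD_of_nonneg _ _ hi0, Int.toNat_natCast]
      rw [List.foldl_cons, hstep]
      have histl' : ∀ i' ∈ it, 0 ≤ i' ∧ i' < ((c.set j m).length : Int) := by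
        simpa using histl
      obtain ⟨L1, L2, ⟨new', hnew', hnd', hnf'⟩, L4, L5⟩ := ih (c.set j m) (q ++ [(j : Int)]) histl'
      set F := it.foldl (pvScanBody adj m u) (c.set j m, q ++ [(j : Int)]) with hF
      have hc1j : (c.set j m).getD j 0 = m := pvGetD_set_self c j m hjlt
      have hFj : F.1.getD j 0 = m := by
        rcases L2 j with h | ⟨_, h, _⟩
        · rw [h, hc1j]
        · exact h
      have hjmem : (j : Int) ∈ F.2 := by
        rw [hnew']
        simp
      have hlen : F.1.length = c.length := by simpa using L1
      refine ⟨hlen, ?_, ?_, ?_, ?_⟩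
      · -- mono
        intro j'
        by_cases hjj : j' = j
        · subst hjj
          exact Or.inr ⟨hcw, hFj, hjmem, hjlt, hedge⟩
        · rcases L2 j' with h | ⟨hW, hM, hMem, hLt, hE⟩
          · exact Or.inl (h.trans (pvGetD_set_ne c j j' m (fun he => hjj he.symm)))
          · rw [pvGetD_set_ne c j j' m (fun he => hjj he.symm)] at hW
            exact Or.inr ⟨hW, hM, hMem, by simpa using hLt, hE⟩
      · -- queue decomposition
        refine ⟨(j : Int) :: new', by rw [hnew']; simp, ?_, ?_⟩
        · refine List.nodup_cons.mpr ⟨?_, hnd'⟩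
          intro hmem
          obtain ⟨j'', he, _, hw'', _⟩ := hnf' _ hmem
          have : j'' = j := by omega
          rw [this, hc1j] at hw''
          exact hm hw''
        · intro x hx
          rcases List.mem_cons.mp hx with rfl | hx'
          · exact ⟨j, rfl, hjlt, hcw, hFj, hedge⟩
          · obtain ⟨j'', he, hlt'', hw'', hm'', hE''⟩ := hnf' x hx'
            have hne : j'' ≠ j := by
              intro hh
              rw [hh, hc1j] at hw''
              exact hm hw''
            rw [pvGetD_set_ne c j j'' m (fun he2 => hne he2.symm)] at hw''
            exact ⟨j'', he, by simpa using hlt'', hw'', hm'', hE''⟩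
      · -- processed
        intro i' hi' hEdge
        rcases List.mem_cons.mp hi' with rfl | hi''
        · rw [Int.toNat_natCast, hFj]; exact hm
        · exact L4 i' hi'' hEdge
      · -- counting
        have hc : (c.set j m).count (-1) + 1 = c.count (-1) := pvCount_set_dec c j m hjlt hcw hm
        have hq : (q ++ [(j : Int)]).length = q.length + 1 := by simp
        rw [hq] at L5
        push_cast at L5 ⊢
        omega
    · -- the test does not fire
      have hstep : pvScanBody adj m u (c, q) i = (c, q) := by
        simp only [pvScanBody, if_neg hT]
      rw [List.foldl_cons, hstep]
      obtain ⟨L1, L2, L3, L4, L5⟩ := ih c q histl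
      refine ⟨L1, L2, L3, ?_, L5⟩
      intro i' hi' hEdge
      rcases List.mem_cons.mp hi' with rfl | hi''
      · -- i's own test was false, so c[i] was not white, and it stays non-white
        have hEdge' : 0 < PySem.List.pyGetD (PySem.List.pyGetD adj u []) i' 0 := by
          rw [hrowu, PySem.List.pyGetD_of_nonneg _ 0 hi0]
          exact hEdge
        have hw : c.getD i'.toNat 0 ≠ -1 := by
          intro hcon
          exact hT ⟨hEdge', by rwa [PySem.List.pyGetD_of_nonneg c 0 hi0]⟩
        rcases L2 i'.toNat with h | ⟨hW, _⟩
        · rw [h]; exact hw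
        · exact absurd hW hw
      · exact L4 i' hi'' hEdge

-- ===== from the invariant at an empty worklist to the final coloring =====
theorem pvInvA_post (adj : List (List Int)) (n r : Int) (hr1 : -n ≤ r) (hr2 : r < n)
    (c : List Int) (hinv : pvInvA adj n r c []) : pvPost adj n r c := by
  have hSN : pvCellI n r < n.toNat := pvCellI_lt n r hr1 hr2
  have hSb : c.getD (pvCellI n r) 0 = 1 := by
    rcases hinv.vals _ hSN with hv | hv | hv
    · exact absurd hv hinv.root
    · obtain ⟨x, hx, _⟩ := hinv.gray _ hSN hv
      exact absurd hx (List.not_mem_nil)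
    · exact hv
  have key : ∀ j, pvReach adj n r j → c.getD j 0 ≠ -1 ∧ j < n.toNat := by
    intro j h
    rcases h with rfl | ⟨k, hkN, hkE, hpath⟩
    · exact ⟨hinv.root, hSN⟩
    · have hk : c.getD k 0 ≠ -1 ∧ k < n.toNat := ⟨hinv.rootb hSb k hkN hkE, hkN⟩
      induction hpath with
      | refl => exact hk
      | tail h1 h2 ih =>
        obtain ⟨ha, haN⟩ := ih
        rcases hinv.vals _ haN with hv | hv | hv
        · exact absurd hv ha
        · obtain ⟨x, hx, _⟩ := hinv.gray _ haN hv
          exact absurd hx (List.not_mem_nil)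
        · exact ⟨hinv.black _ haN h2.2.1 hv _ h2.1 h2.2.2, h2.1⟩
  refine ⟨hinv.len, fun j hj => ⟨?_, ?_⟩⟩
  · intro hR
    rcases hinv.vals j hj with hv | hv | hv
    · exact absurd hv (key j hR).1
    · obtain ⟨x, hx, _⟩ := hinv.gray _ hj hv
      exact absurd hx (List.not_mem_nil)
    · exact hv
  · intro hNR
    by_contra hne
    exact hNR (hinv.sound j hj hne)

theorem pvInvB_post (adj : List (List Int)) (n r : Int) (hr1 : -n ≤ r) (hr2 : r < n)
    (c : List Int) (hinv : pvInvB adj n r c []) : pvPost adj n r c := by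
  have hSN : pvCellI n r < n.toNat := pvCellI_lt n r hr1 hr2
  have hrc : ∀ v < n.toNat, 0 < (pvRowT adj r).getD v 0 → c.getD v 0 = 1 := by
    rcases hinv.rootc with ⟨x, hx, _⟩ | h
    · exact absurd hx (List.not_mem_nil)
    · exact h
  have key : ∀ j, pvReach adj n r j → c.getD j 0 = 1 ∧ j < n.toNat := by
    intro j h
    rcases h with rfl | ⟨k, hkN, hkE, hpath⟩
    · exact ⟨hinv.root, hSN⟩
    · have hk : c.getD k 0 = 1 ∧ k < n.toNat := ⟨hrc k hkN hkE, hkN⟩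
      induction hpath with
      | refl => exact hk
      | tail h1 h2 ih =>
        obtain ⟨ha, haN⟩ := ih
        rcases hinv.closed _ haN h2.2.1 ha with ⟨x, hx, _⟩ | hcl
        · exact absurd hx (List.not_mem_nil)
        · exact ⟨hcl _ h2.1 h2.2.2, h2.1⟩
  refine ⟨hinv.len, fun j hj => ⟨fun hR => (key j hR).1, ?_⟩⟩
  · intro hNR
    rcases hinv.vals j hj with hv | hv
    · exact hv
    · exact absurd (hinv.sound j hj hv) hNR

theorem pvCellI_of_nonneg (n x : Int) (h : 0 ≤ x) : pvCellI n x = x.toNat := by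
  simp only [pvCellI, if_neg (by omega : ¬ x < 0)]

theorem pvRowI_of_nonneg (adj : List (List Int)) (x : Int) (h : 0 ≤ x) :
    pvRowI adj x = x.toNat := by
  simp only [pvRowI, if_neg (by omega : ¬ x < 0)]

-- ===== outer loop A =====
theorem pvLoopA_post (adj : List (List Int)) (n r : Int) (hn : 0 < n) (hr1 : -n ≤ r) (hr2 : r < n)
    (hshape : ∀ w : Nat, w < n.toNat → w < adj.length ∧ n ≤ ((adj.getD w []).length : Int)) :
    ∀ (fuel : Nat) (c q : List Int), pvInvA adj n r c q →
      (c.count (-1) : Int) + q.length < fuel → pvPost adj n r (pvLoopA adj n fuel c q) := by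
  intro fuel
  induction fuel with
  | zero => intro c q _ hlt; omega
  | succ fuel ih =>
    intro c q hinv hlt
    match q with
    | [] => exact pvInvA_post adj n r hr1 hr2 c (by simpa [pvLoopA] using hinv)
    | u :: rest =>
      obtain ⟨hul, huu, hucell, hclass⟩ := hinv.qmem u (List.mem_cons_self ..)
      have hclen : c.length = n.toNat := hinv.len
      have hcuN : pvCellI n u < n.toNat := pvCellI_lt n u hul huu
      have hadjlen : n ≤ (adj.length : Int) := by
        have := (hshape (n.toNat - 1) (by omega)).1
        omega
      have hpyrow : PySem.List.pyGetD adj u [] = adj.getD (pvRowI adj u) [] :=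
        pvGetD_token adj u (by omega)
      have hbody : ∀ (s : List Int × List Int), ∀ i ∈ PySem.List.pyRange 0 n 1,
          pvBodyA adj u s i = pvScanBody adj 0 u s i := by
        intro s i _
        simp only [pvBodyA, pvScanBody]
        by_cases h1 : PySem.List.pyGetD (PySem.List.pyGetD adj u []) i 0 > 0 <;>
          by_cases h2 : PySem.List.pyGetD s.1 i 0 = -1 <;> simp [h1, h2]
      have his : ∀ i ∈ PySem.List.pyRange 0 n 1, 0 ≤ i ∧ i < (c.length : Int) := by
        intro i hi
        rw [PySem.List.mem_pyRange_one] at hi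
        exact ⟨hi.1, by rw [hclen]; omega⟩
      obtain ⟨G1, G2, ⟨new, hnew, hnd, hnf⟩, G4, G5⟩ :=
        pvScan_spec adj 0 u (adj.getD (pvRowI adj u) []) (by decide) hpyrow
          (PySem.List.pyRange 0 n 1) c rest his
      set S := (PySem.List.pyRange 0 n 1).foldl (pvScanBody adj 0 u) (c, rest) with hS
      have hfold : (PySem.List.pyRange 0 n 1).foldl (pvBodyA adj u) (c, rest) = S :=
        PySem.List.foldl_congr_mem _ _ _ _ (fun s i hi => hbody s i hi)
      have hloop : pvLoopA adj n (fuel + 1) c (u :: rest) =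
          pvLoopA adj n fuel (PySem.List.pySetD S.1 u 1) S.2 := by
        simp only [pvLoopA]
        rw [hfold]
      rw [hloop]
      have hSlen : S.1.length = n.toNat := by rw [G1, hclen]
      have hScu : S.1.getD (pvCellI n u) 0 = 0 := by
        rcases G2 (pvCellI n u) with h | ⟨hW, _⟩
        · rw [h, hucell]
        · rw [hucell] at hW; exact absurd hW (by decide)
      have hset : PySem.List.pySetD S.1 u 1 = S.1.set (pvCellI n u) 1 := by
        exact pvSetD_cell S.1 n u 1 (by rw [hSlen]; omega) hul huu
      rw [hset]
      set c' := S.1.set (pvCellI n u) 1 with hc'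
      -- uniform reachability of the token's cell and of its row's targets
      have hReachCu : pvReach adj n r (pvCellI n u) :=
        hinv.sound (pvCellI n u) hcuN (by rw [hucell]; decide)
      have hnewReach : ∀ j < n.toNat, 0 < (adj.getD (pvRowI adj u) []).getD j 0 →
          pvReach adj n r j := by
        intro j hjN hEj
        rcases hclass with rfl | ⟨hu0, hucS⟩
        · exact Or.inr ⟨j, hjN, hEj, Relation.ReflTransGen.refl⟩
        · rw [pvRowI_of_nonneg adj u hu0] at hEj
          have hcu : pvCellI n u = u.toNat := pvCellI_of_nonneg n u hu0
          have hcuS : pvCellI n u ≠ pvCellI n r := by rw [hcu]; exact hucS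
          rcases hReachCu with hS' | ⟨k, hkN, hkE, hpath⟩
          · exact absurd hS' hcuS
          · refine Or.inr ⟨k, hkN, hkE, Relation.ReflTransGen.tail hpath ?_⟩
            refine ⟨hjN, hcuS, ?_⟩
            rw [pvE, hcu]
            exact hEj
      have hproc : ∀ v < n.toNat, 0 < (adj.getD (pvRowI adj u) []).getD v 0 →
          S.1.getD v 0 ≠ -1 := by
        intro v hv hEv
        have hvmem : (v : Int) ∈ PySem.List.pyRange 0 n 1 := by
          rw [PySem.List.mem_pyRange_one]
          exact ⟨by positivity, by omega⟩
        have := G4 _ hvmem (by rwa [Int.toNat_natCast])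
        rwa [Int.toNat_natCast] at this
      -- rest tokens: cells distinct from the popped one, still gray after the scan
      have hcells := hinv.cells
      rw [List.map_cons, List.nodup_cons] at hcells
      have hrestcell : ∀ x ∈ rest, pvCellI n x ≠ pvCellI n u := by
        intro x hx he
        exact hcells.1 (he ▸ List.mem_map_of_mem hx)
      have hrestgray : ∀ x ∈ rest, S.1.getD (pvCellI n x) 0 = 0 := by
        intro x hx
        obtain ⟨_, _, hg, _⟩ := hinv.qmem x (List.mem_cons_of_mem _ hx)
        rcases G2 (pvCellI n x) with h | ⟨hW, _⟩
        · rw [h, hg]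
        · rw [hg] at hW; exact absurd hW (by decide)
      -- values never become white during the scan or the final set
      have hkeep : ∀ j : Nat, c.getD j 0 ≠ -1 → c'.getD j 0 ≠ -1 := by
        intro j hj
        by_cases hjc : j = pvCellI n u
        · rw [hjc, hc', pvGetD_set_self _ _ _ (by omega)]; decide
        · rw [hc', pvGetD_set_ne _ _ _ _ (fun he => hjc he.symm)]
          rcases G2 j with h | ⟨_, h, _⟩
          · rw [h]; exact hj
          · rw [h]; decide
      have hkeep1 : ∀ j : Nat, c.getD j 0 = 1 → c'.getD j 0 = 1 := by
        intro j hj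
        by_cases hjc : j = pvCellI n u
        · rw [hjc, hc', pvGetD_set_self _ _ _ (by omega)]
        · rw [hc', pvGetD_set_ne _ _ _ _ (fun he => hjc he.symm)]
          rcases G2 j with h | ⟨hW, _⟩
          · rw [h]; exact hj
          · rw [hj] at hW; exact absurd hW (by decide)
      have hinv' : pvInvA adj n r c' S.2 := by
        refine ⟨by simp [hc', hSlen], ?_, ?_, ?_, ?_, ?_, ?_, ?_, ?_⟩
        · -- qmem
          intro x hx
          rw [hnew] at hx
          rcases List.mem_append.mp hx with hx | hx
          · obtain ⟨h1, h2, _, h4⟩ := hinv.qmem x (List.mem_cons_of_mem _ hx)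
            refine ⟨h1, h2, ?_, h4⟩
            rw [hc', pvGetD_set_ne _ _ _ _ (fun he => hrestcell x hx he.symm),
              hrestgray x hx]
          · obtain ⟨j, rfl, hjlt, hjw, hm1, _⟩ := hnf x hx
            have hjcu : j ≠ pvCellI n u := by
              intro hh
              rw [hh, hucell] at hjw
              exact absurd hjw (by decide)
            refine ⟨by omega, by omega, ?_, ?_⟩
            · rw [pvCellI_natCast, hc', pvGetD_set_ne _ _ _ _ (fun he => hjcu he.symm), hm1]
            · refine Or.inr ⟨by positivity, ?_⟩
              rw [Int.toNat_natCast]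
              intro hh
              rw [hh] at hjw
              exact hinv.root hjw
        · -- cells nodup
          rw [hnew, List.map_append]
          have hnewcell : ∀ x ∈ new, ∀ y ∈ new, pvCellI n x = pvCellI n y → x = y := by
            intro x hx y hy he
            obtain ⟨jx, rfl, _⟩ := hnf x hx
            obtain ⟨jy, rfl, _⟩ := hnf y hy
            rw [pvCellI_natCast, pvCellI_natCast] at he
            rw [he]
          refine List.Nodup.append hcells.2 (hnd.map_on hnewcell) ?_
          intro a ha hb
          obtain ⟨x, hx, rfl⟩ := List.mem_map.mp ha
          obtain ⟨y, hy, hecell⟩ := List.mem_map.mp hb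
          obtain ⟨jy, rfl, _, hyw, _⟩ := hnf y hy
          obtain ⟨_, _, hxg, _⟩ := hinv.qmem x (List.mem_cons_of_mem _ hx)
          rw [pvCellI_natCast] at hecell
          rw [hecell, hxg] at hyw
          exact absurd hyw (by decide)
        · -- vals
          intro j hj
          by_cases hjc : j = pvCellI n u
          · rw [hjc, hc', pvGetD_set_self _ _ _ (by omega)]
            tauto
          · rw [hc', pvGetD_set_ne _ _ _ _ (fun he => hjc he.symm)]
            rcases G2 j with h | ⟨_, h, _⟩
            · rw [h]; exact hinv.vals j hj
            · rw [h]; tauto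
        · -- gray
          intro j hj hg
          have hjc : j ≠ pvCellI n u := by
            intro hh
            rw [hh, hc', pvGetD_set_self _ _ _ (by omega)] at hg
            exact absurd hg (by decide)
          rw [hc', pvGetD_set_ne _ _ _ _ (fun he => hjc he.symm)] at hg
          rcases G2 j with h | ⟨_, _, hmem, _⟩
          · rw [h] at hg
            obtain ⟨x, hx, hcx⟩ := hinv.gray j hj hg
            rcases List.mem_cons.mp hx with rfl | hx'
            · exact absurd hcx.symm hjc
            · exact ⟨x, by rw [hnew]; exact List.mem_append.mpr (Or.inl hx'), hcx⟩
          · exact ⟨(j : Int), hmem, pvCellI_natCast n j⟩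
        · -- sound
          intro j hj hne
          by_cases hjc : j = pvCellI n u
          · rw [hjc]; exact hReachCu
          · rw [hc', pvGetD_set_ne _ _ _ _ (fun he => hjc he.symm)] at hne
            rcases G2 j with h | ⟨_, _, _, _, hE⟩
            · rw [h] at hne; exact hinv.sound j hj hne
            · exact hnewReach j hj hE
        · -- black
          intro w hw hwS hw1 v hv hEv
          by_cases hwc : w = pvCellI n u
          · subst hwc
            have hrow : adj.getD (pvRowI adj u) [] = adj.getD (pvCellI n u) [] := by
              rcases hclass with rfl | ⟨hu0, _⟩
              · exact absurd rfl hwS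
              · rw [pvRowI_of_nonneg adj u hu0, pvCellI_of_nonneg n u hu0]
            have hEv' : 0 < (adj.getD (pvRowI adj u) []).getD v 0 := by
              rw [hrow]; exact hEv
            by_cases hvc : v = pvCellI n u
            · rw [hvc, hc', pvGetD_set_self _ _ _ (by omega)]; decide
            · rw [hc', pvGetD_set_ne _ _ _ _ (fun he => hvc he.symm)]
              exact hproc v hv hEv'
          · have hwold : c.getD w 0 = 1 := by
              rw [hc', pvGetD_set_ne _ _ _ _ (fun he => hwc he.symm)] at hw1
              rcases G2 w with h | ⟨_, h, _⟩
              · rw [h] at hw1; exact hw1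
              · rw [h] at hw1; exact absurd hw1 (by decide)
            exact hkeep v (hinv.black w hw hwS hwold v hv hEv)
        · -- rootb
          intro hSb v hv hEv
          by_cases hcuS : pvCellI n u = pvCellI n r
          · -- the popped token is the root token: its processed row IS the root row
            have hrow : adj.getD (pvRowI adj u) [] = pvRowT adj r := by
              rcases hclass with rfl | ⟨hu0, hucS⟩
              · rfl
              · exact absurd (by rwa [pvCellI_of_nonneg n u hu0] at hcuS) hucS
            have hEv' : 0 < (adj.getD (pvRowI adj u) []).getD v 0 := by rw [hrow]; exact hEv
            by_cases hvc : v = pvCellI n u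
            · rw [hvc, hc', pvGetD_set_self _ _ _ (by omega)]; decide
            · rw [hc', pvGetD_set_ne _ _ _ _ (fun he => hvc he.symm)]
              exact hproc v hv hEv'
          · have hSold : c.getD (pvCellI n r) 0 = 1 := by
              rw [hc', pvGetD_set_ne _ _ _ _ (fun he => hcuS he)] at hSb
              rcases G2 (pvCellI n r) with h | ⟨hW, _⟩
              · rw [h] at hSb; exact hSb
              · exact absurd hW hinv.root
            exact hkeep v (hinv.rootb hSold v hv hEv)
        · -- root
          exact hkeep _ hinv.root
      have hcnt : c'.count (-1) = S.1.count (-1) :=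
        pvCount_set_eq S.1 (pvCellI n u) 1 (by omega) (by rw [hScu]; decide) (by decide)
      have hlt' : (c'.count (-1) : Int) + S.2.length < fuel := by
        rw [hcnt]
        have : ((u :: rest).length : Int) = rest.length + 1 := by simp
        omega
      exact ih c' S.2 hinv' hlt'

-- ===== outer loop B =====
theorem pvDfsLoop_post (adj : List (List Int)) (n r : Int) (hn : 0 < n) (hr1 : -n ≤ r) (hr2 : r < n)
    (hshape : ∀ w : Nat, w < n.toNat → w < adj.length ∧ n ≤ ((adj.getD w []).length : Int)) :
    ∀ (fuel : Nat) (c st : List Int), pvInvB adj n r c st →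
      (c.count (-1) : Int) + st.length < fuel → pvPost adj n r (pvDfsLoop adj n fuel c st) := by
  intro fuel
  induction fuel with
  | zero => intro c st _ hlt; omega
  | succ fuel ih =>
    intro c st hinv hlt
    rcases List.eq_nil_or_concat st with rfl | ⟨xs, x, rfl⟩
    · exact pvInvB_post adj n r hr1 hr2 c (by simpa [pvDfsLoop, PySem.List.pop?] using hinv)
    · simp only [List.concat_eq_append] at hinv hlt ⊢
      obtain ⟨hul, huu, hucell, hclass⟩ := hinv.stmem x (by simp)
      have hclen : c.length = n.toNat := hinv.len
      have hcuN : pvCellI n x < n.toNat := pvCellI_lt n x hul huu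
      have hadjlen : n ≤ (adj.length : Int) := by
        have := (hshape (n.toNat - 1) (by omega)).1
        omega
      have hpyrow : PySem.List.pyGetD adj x [] = adj.getD (pvRowI adj x) [] :=
        pvGetD_token adj x (by omega)
      set rowu := adj.getD (pvRowI adj x) [] with hrowu
      have his : ∀ i ∈ PySem.List.pyRange 0 n 1, 0 ≤ i ∧ i < (c.length : Int) := by
        intro i hi
        rw [PySem.List.mem_pyRange_one] at hi
        exact ⟨hi.1, by rw [hclen]; omega⟩
      obtain ⟨G1, G2, ⟨new, hnew, hnd, hnf⟩, G4, G5⟩ :=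
        pvScan_spec adj 1 x rowu (by decide) hpyrow (PySem.List.pyRange 0 n 1) c xs his
      set S := (PySem.List.pyRange 0 n 1).foldl (pvScanBody adj 1 x) (c, xs) with hS
      have hloop : pvDfsLoop adj n (fuel + 1) c (xs ++ [x]) = pvDfsLoop adj n fuel S.1 S.2 := by
        simp only [pvDfsLoop, PySem.List.pop?_last]
        rw [pvScanRow_eq_foldl adj x (n.toNat + 1) 0 c xs (by omega)]
      rw [hloop]
      have hSlen : S.1.length = n.toNat := by rw [G1, hclen]
      have hpres : ∀ j : Nat, c.getD j 0 = 1 → S.1.getD j 0 = 1 := by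
        intro j hj
        rcases G2 j with h | ⟨hW, _⟩
        · rw [h, hj]
        · rw [hj] at hW; exact absurd hW (by decide)
      have hvals : ∀ j < n.toNat, S.1.getD j 0 = -1 ∨ S.1.getD j 0 = 1 := by
        intro j hj
        rcases G2 j with h | ⟨_, h, _⟩
        · rw [h]; exact hinv.vals j hj
        · rw [h]; tauto
      have hReachCu : pvReach adj n r (pvCellI n x) :=
        hinv.sound (pvCellI n x) hcuN hucell
      have hnewReach : ∀ j < n.toNat, 0 < rowu.getD j 0 → pvReach adj n r j := by
        intro j hjN hEj
        rcases hclass with rfl | ⟨hu0, hucS⟩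
        · exact Or.inr ⟨j, hjN, hEj, Relation.ReflTransGen.refl⟩
        · rw [hrowu, pvRowI_of_nonneg adj x hu0] at hEj
          have hcu : pvCellI n x = x.toNat := pvCellI_of_nonneg n x hu0
          have hcuS : pvCellI n x ≠ pvCellI n r := by rw [hcu]; exact hucS
          rcases hReachCu with hS' | ⟨k, hkN, hkE, hpath⟩
          · exact absurd hS' hcuS
          · refine Or.inr ⟨k, hkN, hkE, Relation.ReflTransGen.tail hpath ?_⟩
            refine ⟨hjN, hcuS, ?_⟩
            rw [pvE, hcu]
            exact hEj
      have hproc : ∀ v < n.toNat, 0 < rowu.getD v 0 → S.1.getD v 0 = 1 := by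
        intro v hv hEv
        have hvmem : (v : Int) ∈ PySem.List.pyRange 0 n 1 := by
          rw [PySem.List.mem_pyRange_one]
          exact ⟨by positivity, by omega⟩
        have hne := G4 _ hvmem (by rwa [Int.toNat_natCast])
        rw [Int.toNat_natCast] at hne
        rcases hvals v hv with h | h
        · exact absurd h hne
        · exact h
      have hinv' : pvInvB adj n r S.1 S.2 := by
        refine ⟨hSlen, ?_, hvals, ?_, ?_, ?_, hpres _ hinv.root⟩
        · -- stmem
          intro y hy
          rw [hnew] at hy
          rcases List.mem_append.mp hy with hy | hy
          · obtain ⟨h1, h2, h3, h4⟩ := hinv.stmem y (by simp [hy])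
            exact ⟨h1, h2, hpres _ h3, h4⟩
          · obtain ⟨j, rfl, hjlt, hjw, hm1, _⟩ := hnf y hy
            refine ⟨by omega, by omega, by rwa [pvCellI_natCast], ?_⟩
            refine Or.inr ⟨by positivity, ?_⟩
            rw [Int.toNat_natCast]
            intro hh
            rw [hh] at hjw
            rw [hinv.root] at hjw
            exact absurd hjw (by decide)
        · -- closed
          intro w hw hwS hw1
          by_cases hwc : w = pvCellI n x
          · subst hwc
            have hrow : rowu = adj.getD (pvCellI n x) [] := by
              rcases hclass with rfl | ⟨hu0, _⟩
              · exact absurd rfl hwS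
              · rw [hrowu, pvRowI_of_nonneg adj x hu0, pvCellI_of_nonneg n x hu0]
            refine Or.inr fun v hv hEv => hproc v hv ?_
            rw [hrow]
            exact hEv
          · rcases G2 w with h | ⟨_, _, hmem, _⟩
            · rw [h] at hw1
              rcases hinv.closed w hw hwS hw1 with ⟨y, hy, hcy⟩ | hcl
              · rcases List.mem_append.mp hy with hy' | hy'
                · exact Or.inl ⟨y, by rw [hnew]; exact List.mem_append.mpr (Or.inl hy'), hcy⟩
                · rw [List.mem_singleton] at hy'
                  rw [hy'] at hcy
                  exact absurd hcy.symm hwc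
              · exact Or.inr fun v hv hEv => hpres v (hcl v hv hEv)
            · exact Or.inl ⟨(w : Int), hmem, pvCellI_natCast n w⟩
        · -- rootc
          by_cases hcuS : pvCellI n x = pvCellI n r
          · refine Or.inr ?_
            intro v hv hEv
            have hrow : rowu = pvRowT adj r := by
              rcases hclass with rfl | ⟨hu0, hucS⟩
              · rfl
              · exact absurd (by rwa [pvCellI_of_nonneg n x hu0] at hcuS) hucS
            refine hproc v hv ?_
            rw [hrow]
            exact hEv
          · rcases hinv.rootc with ⟨y, hy, hcy⟩ | hrc
            · rcases List.mem_append.mp hy with hy' | hy'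
              · exact Or.inl ⟨y, by rw [hnew]; exact List.mem_append.mpr (Or.inl hy'), hcy⟩
              · rw [List.mem_singleton] at hy'
                rw [hy'] at hcy
                exact absurd hcy hcuS
            · exact Or.inr fun v hv hEv => hpres v (hrc v hv hEv)
        · -- sound
          intro j hj h1
          rcases G2 j with h | ⟨_, _, _, _, hE⟩
          · rw [h] at h1; exact hinv.sound j hj h1
          · exact hnewReach j hj hE
      have hlt' : (S.1.count (-1) : Int) + S.2.length < fuel := by
        have : ((xs ++ [x]).length : Int) = xs.length + 1 := by simp
        omega
      exact ih S.1 S.2 hinv' hlt'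

-- ===== initial states =====
theorem pvInit_replicate (n : Int) :
    (PySem.List.pyRange 0 n 1).foldl (fun c (_ : Int) => c ++ [(-1 : Int)]) [] =
      List.replicate n.toNat (-1) := by
  rw [PySem.List.foldl_append_singleton_eq_map (f := fun _ => (-1 : Int))]
  simp [List.map_const', PySem.List.length_pyRange_one]

theorem pvRep_getD (n : Int) (j : Nat) (hj : j < n.toNat) :
    (List.replicate n.toNat (-1 : Int)).getD j 0 = -1 := by
  simp [List.getD_eq_getElem?_getD, hj]

theorem pvRep_count (n : Int) : (List.replicate n.toNat (-1 : Int)).count (-1) = n.toNat := by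
  simp

-- ===== the full equivalence =====
theorem pvMain (adj : List (List Int)) (n r : Int)
    (hpre : Pre_encontra_territorio adj n r) :
    encontra_territorio adj n r = encontra_territorio_alt adj n r := by
  obtain ⟨hr1, hr2, hadjl, hshape', hrootrow'⟩ := hpre
  have hn : 0 < n := by omega
  have hshape : ∀ w : Nat, w < n.toNat → w < adj.length ∧ n ≤ ((adj.getD w []).length : Int) := by
    intro w hw
    have hwa : w < adj.length := by omega
    refine ⟨hwa, ?_⟩
    have h1 : w < (adj.take n.toNat).length := by
      simp only [List.length_take]
      omega
    have h2 : (adj.take n.toNat)[w]'h1 = adj.getD w [] := by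
      rw [List.getElem_take, List.getD_eq_getElem _ _ hwa]
    exact h2 ▸ hshape' _ (List.getElem_mem h1)
  have hSN : pvCellI n r < n.toNat := pvCellI_lt n r hr1 hr2
  have hreplen : ((List.replicate n.toNat (-1 : Int)).length : Int) = n := by
    simp
    omega
  -- the two initial colorings
  have hA : encontra_territorio adj n r =
      pvLoopA adj n (n.toNat + 2)
        ((List.replicate n.toNat (-1)).set (pvCellI n r) 0) [r] := by
    simp only [encontra_territorio]
    rw [pvInit_replicate, pvSetD_cell _ n r 0 hreplen hr1 hr2]
  have hB : encontra_territorio_alt adj n r =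
      pvDfsLoop adj n (n.toNat + 2)
        ((List.replicate n.toNat (-1)).set (pvCellI n r) 1) [r] := by
    simp only [encontra_territorio_alt]
    rw [PySem.List.pyRepeat_singleton, pvSetD_cell _ n r 1 hreplen hr1 hr2]
  set cA := (List.replicate n.toNat (-1 : Int)).set (pvCellI n r) 0 with hcA
  set cB := (List.replicate n.toNat (-1 : Int)).set (pvCellI n r) 1 with hcB
  have hlenA : cA.length = n.toNat := by simp [hcA]
  have hlenB : cB.length = n.toNat := by simp [hcB]
  have hgetA : ∀ j : Nat, j < n.toNat → j ≠ pvCellI n r → cA.getD j 0 = -1 := by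
    intro j hj hne
    rw [hcA, pvGetD_set_ne _ _ _ _ (fun he => hne he.symm)]
    exact pvRep_getD n j hj
  have hgetB : ∀ j : Nat, j < n.toNat → j ≠ pvCellI n r → cB.getD j 0 = -1 := by
    intro j hj hne
    rw [hcB, pvGetD_set_ne _ _ _ _ (fun he => hne he.symm)]
    exact pvRep_getD n j hj
  have hselfA : cA.getD (pvCellI n r) 0 = 0 := pvGetD_set_self _ _ _ (by simp [hSN])
  have hselfB : cB.getD (pvCellI n r) 0 = 1 := pvGetD_set_self _ _ _ (by simp [hSN])
  have hinvA : pvInvA adj n r cA [r] := by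
    refine ⟨hlenA, ?_, by simp, ?_, ?_, ?_, ?_, ?_, by rw [hselfA]; decide⟩
    · intro x hx
      rw [List.mem_singleton] at hx
      subst hx
      exact ⟨hr1, hr2, hselfA, Or.inl rfl⟩
    · intro j hj
      by_cases hje : j = pvCellI n r
      · rw [hje, hselfA]; tauto
      · rw [hgetA j hj hje]; tauto
    · intro j hj hg
      by_cases hje : j = pvCellI n r
      · exact ⟨r, List.mem_singleton.mpr rfl, hje.symm⟩
      · rw [hgetA j hj hje] at hg; exact absurd hg (by decide)
    · intro j hj hne
      by_cases hje : j = pvCellI n r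
      · exact Or.inl hje
      · exact absurd (hgetA j hj hje) hne
    · intro w hw hwS h1 v hv hE
      rw [hgetA w hw hwS] at h1
      exact absurd h1 (by decide)
    · intro h1
      rw [hselfA] at h1
      exact absurd h1 (by decide)
  have hinvB : pvInvB adj n r cB [r] := by
    refine ⟨hlenB, ?_, ?_, ?_, ?_, ?_, hselfB⟩
    · intro x hx
      rw [List.mem_singleton] at hx
      subst hx
      exact ⟨hr1, hr2, hselfB, Or.inl rfl⟩
    · intro j hj
      by_cases hje : j = pvCellI n r
      · rw [hje, hselfB]; tauto
      · rw [hgetB j hj hje]; tauto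
    · intro w hw hwS h1
      rw [hgetB w hw hwS] at h1
      exact absurd h1 (by decide)
    · exact Or.inl ⟨r, List.mem_singleton.mpr rfl, rfl⟩
    · intro j hj h1
      by_cases hje : j = pvCellI n r
      · exact Or.inl hje
      · rw [hgetB j hj hje] at h1
        exact absurd h1 (by decide)
  have hcntA : cA.count (-1) + 1 = n.toNat := by
    rw [← pvRep_count n]
    exact pvCount_set_dec _ _ _ (by simp [hSN]) (pvRep_getD n _ hSN) (by decide)
  have hcntB : cB.count (-1) + 1 = n.toNat := by
    rw [← pvRep_count n]
    exact pvCount_set_dec _ _ _ (by simp [hSN]) (pvRep_getD n _ hSN) (by decide)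
  have hpostA := pvLoopA_post adj n r hn hr1 hr2 hshape (n.toNat + 2) cA [r] hinvA
    (by simp only [List.length_singleton]; push_cast; omega)
  have hpostB := pvDfsLoop_post adj n r hn hr1 hr2 hshape (n.toNat + 2) cB [r] hinvB
    (by simp only [List.length_singleton]; push_cast; omega)
  rw [hA, hB]
  obtain ⟨hlA, hptA⟩ := hpostA
  obtain ⟨hlB, hptB⟩ := hpostB
  apply List.ext_getElem (by rw [hlA, hlB])
  intro i h1 h2
  have hiN : i < n.toNat := by omega
  have e1 : (pvLoopA adj n (n.toNat + 2) cA [r])[i] =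
      (pvLoopA adj n (n.toNat + 2) cA [r]).getD i 0 := (List.getD_eq_getElem _ _ h1).symm
  have e2 : (pvDfsLoop adj n (n.toNat + 2) cB [r])[i] =
      (pvDfsLoop adj n (n.toNat + 2) cB [r]).getD i 0 := (List.getD_eq_getElem _ _ h2).symm
  rw [e1, e2]
  by_cases hR : pvReach adj n r i
  · rw [(hptA i hiN).1 hR, (hptB i hiN).1 hR]
  · rw [(hptA i hiN).2 hR, (hptB i hiN).2 hR]

-- ===== VERDICT (by name: the statement is the Claim_ definition above) =====
theorem encontra_territorio_spec : Claim_equal_encontra_territorio := by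
  intro adj n r _ hpre
  exact pvMain adj n r hpre
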